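-- pv_equiv track=rewrite | github.com/Yeom-Yeom/CodingTest_Practice | Lv.0/page3/alien_dic.py | alien_dic
-- ===== SOURCE A (Python) =====
-- def alien_dic(spell: list, dic: list):
--     spell = {i : 0 for i in spell}
--
--     for x in dic:
--         if len(x) == len(spell):
--             for y in x:
--                 if y in spell:
--                     spell[y] +=1
--                 else:
--                     break
--             if len(set(spell.values())) ==1 and sum(set(spell.values())) ==1:
--                 return 1
--             spell = {i: 0 for i in spell}
--     return 2
-- ===== SOURCE B (Python) =====
-- def alien_dic(spell: list, dic: list):
--     if not spell:
--         return 2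
--     target = sorted(set(spell))
--     for x in dic:
--         if sorted(x) == target:
--             return 1
--     return 2
-- ===== Notes on version B (the rewrite author's own statement) =====
-- stated objective: simpler
-- what changed: B replaces A's per-word counting dict with reset and the distinct-values check by one precomputed sorted signature of set(spell) compared against sorted(word), with the empty-spell case handled once up front.
import Mathlib
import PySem

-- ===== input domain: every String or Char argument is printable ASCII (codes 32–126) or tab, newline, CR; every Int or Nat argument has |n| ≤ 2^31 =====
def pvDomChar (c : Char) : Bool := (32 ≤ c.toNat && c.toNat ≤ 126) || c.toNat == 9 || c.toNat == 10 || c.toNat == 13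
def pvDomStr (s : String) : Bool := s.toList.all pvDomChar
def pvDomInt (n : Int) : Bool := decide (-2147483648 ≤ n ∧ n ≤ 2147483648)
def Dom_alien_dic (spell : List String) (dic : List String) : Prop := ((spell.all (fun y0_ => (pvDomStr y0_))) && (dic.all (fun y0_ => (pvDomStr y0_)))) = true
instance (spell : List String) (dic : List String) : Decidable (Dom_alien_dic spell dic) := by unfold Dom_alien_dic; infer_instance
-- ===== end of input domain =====

-- B replaces A's per-word counting dict (with per-word reset) by one precomputed sorted signature of set(spell); objective: simpler.

-- ===== PORT A =====
-- spell = {i : 0 for i in spell}  (also the reset inside the loop)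
def alien_mkZero (ks : List String) : PySem.Dict String Int :=
  ks.foldl (fun d i => d.insert i 0) PySem.Dict.empty

-- the inner 'for y in x: if y in spell: spell[y] += 1 else: break' loop over the word's characters
def alien_inner (d : PySem.Dict String Int) (cs : List Char) : PySem.Dict String Int :=
  match cs with
  | [] => d
  | c :: rest =>
    if d.contains (String.ofList [c]) then alien_inner (d.modify (String.ofList [c]) 0 (· + 1)) rest
    else d

-- len(set(spell.values())) == 1 and sum(set(spell.values())) == 1
def alien_check (d : PySem.Dict String Int) : Bool :=
  decide ((PySem.Set.ofList d.values).length = 1) && decide ((PySem.Set.ofList d.values).sum = 1)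

-- the 'for x in dic' loop carrying the dict (reset after each tested word)
def alien_loop (d : PySem.Dict String Int) (ws : List String) : Int :=
  match ws with
  | [] => 2
  | x :: rest =>
    if PySem.Str.len x = (d.size : Int) then
      if alien_check (alien_inner d x.toList) then 1
      else alien_loop (alien_mkZero (alien_inner d x.toList).keys) rest
    else alien_loop d rest

def alien_dic (spell : List String) (dic : List String) : Int :=
  alien_loop (alien_mkZero spell) dic

-- ===== PORT B =====
-- for x in dic: if sorted(x) == target: return 1
def alien_loopB (target : List String) (ws : List String) : Int :=
  match ws with
  | [] => 2
  | x :: rest =>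
    if PySem.List.sorted (x.toList.map (fun c => String.ofList [c])) (fun s => s) = target then 1
    else alien_loopB target rest

def alien_dic_alt (spell : List String) (dic : List String) : Int :=
  if spell = [] then 2
  else alien_loopB (PySem.List.sorted (PySem.Set.ofList spell) (fun s => s)) dic

-- ===== PRECONDITION & SPEC =====
def Spec_alien_dic (spell : List String) (dic : List String) (out : Int) : Prop := out = alien_dic_alt spell dic
instance (spell : List String) (dic : List String) (out : Int) : Decidable (Spec_alien_dic spell dic out) := by unfold Spec_alien_dic; infer_instance

-- ===== CLAIM (what is proved, stated in full; the proofs are below) =====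
def Claim_equal_alien_dic : Prop := ∀ (spell : List String) (dic : List String), Dom_alien_dic spell dic → Spec_alien_dic spell dic (alien_dic spell dic)

-- ===== LEMMAS AND PROOFS =====

-- getD through the zero-initialising foldl
theorem alien_mkZero_getD (ks : List String) (d : PySem.Dict String Int) (k : String) (d0 : Int) :
    (ks.foldl (fun d i => d.insert i 0) d).getD k d0 = if k ∈ ks then 0 else d.getD k d0 := by
  induction ks generalizing d with
  | nil => simp
  | cons i rest ih =>
    simp only [List.foldl_cons, ih, PySem.Dict.getD_insert, List.mem_cons]
    by_cases h1 : k ∈ rest <;> by_cases h2 : k = i <;> simp [h1, h2]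

theorem alien_mkZero_keys (ks : List String) : (alien_mkZero ks).keys = PySem.Set.ofList ks := by
  have := PySem.Dict.keys_foldl_insert (ν := Int) ks (fun _ _ => 0) PySem.Dict.empty
  simpa [alien_mkZero, PySem.Set.update_nil_left] using this

theorem alien_size_eq_keys_length (d : PySem.Dict String Int) : d.size = d.keys.length := by
  simp [PySem.Dict.size, PySem.Dict.keys]

-- modify at a present key does not change the contains test
theorem alien_contains_modify_eq (d : PySem.Dict String Int) (y : String) (h : d.contains y = true) (k : String) :
    (d.modify y 0 (· + 1)).contains k = d.contains k := by
  rw [PySem.Dict.contains_modify]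
  by_cases hk : k = y
  · subst hk; simp [h]
  · simp [hk]

theorem alien_inner_keys (cs : List Char) (d : PySem.Dict String Int) :
    (alien_inner d cs).keys = d.keys := by
  induction cs generalizing d with
  | nil => rfl
  | cons c rest ih =>
    rw [alien_inner]
    split
    · rename_i h
      rw [ih, PySem.Dict.keys_modify, PySem.Dict.keys_insert_of_contains _ _ h]
    · rfl

-- the inner loop counts, over the takeWhile prefix of in-dict characters
theorem alien_inner_getD (cs : List Char) (d : PySem.Dict String Int) (k : String) :
    (alien_inner d cs).getD k 0 =
      d.getD k 0 +
        ((cs.takeWhile (fun c => d.contains (String.ofList [c]))).map (fun c => String.ofList [c])).count k := by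
  induction cs generalizing d with
  | nil => simp [alien_inner]
  | cons c rest ih =>
    rw [alien_inner]
    by_cases h : d.contains (String.ofList [c])
    · rw [if_pos h, List.takeWhile_cons_of_pos (p := fun c => d.contains (String.ofList [c])) h, ih]
      have hpred : (fun c' => (d.modify (String.ofList [c]) 0 (· + 1)).contains (String.ofList [c']))
          = (fun c' => d.contains (String.ofList [c'])) := by
        funext c'
        exact alien_contains_modify_eq d _ h _
      rw [hpred, PySem.Dict.getD_modify]
      simp only [List.map_cons, List.count_cons]
      by_cases hk : k = String.ofList [c]
      · simp [hk]; ring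
      · simp [hk, Ne.symm hk]
    · rw [if_neg h, List.takeWhile_cons_of_neg (p := fun c => d.contains (String.ofList [c])) (by simpa using h)]
      simp

theorem alien_ofList_ones (vs : List Int) (h : ∀ v ∈ vs, v = 1) :
    PySem.Set.ofList vs = [] ∨ PySem.Set.ofList vs = [1] := by
  induction vs with
  | nil => left; rfl
  | cons x xs ih =>
    have hx : x = 1 := h x (List.mem_cons_self)
    have := ih (fun v hv => h v (List.mem_cons_of_mem _ hv))
    right
    rw [PySem.Set.ofList_cons, hx]
    rcases this with h0 | h0 <;> rw [h0] <;> simp [PySem.Set.discard]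

-- set(vs) has exactly the single element 1 iff vs is nonempty and all-ones
theorem alien_setvals (vs : List Int) :
    ((PySem.Set.ofList vs).length = 1 ∧ (PySem.Set.ofList vs).sum = 1) ↔ (vs ≠ [] ∧ ∀ v ∈ vs, v = 1) := by
  constructor
  · rintro ⟨hlen, hsum⟩
    obtain ⟨a, ha⟩ := List.length_eq_one_iff.mp hlen
    have hsa : a = 1 := by simpa [ha] using hsum
    constructor
    · rintro rfl; simp at hlen
    · intro v hv
      have : v ∈ PySem.Set.ofList vs := (PySem.Set.mem_ofList vs v).mpr hv
      rw [ha] at this; simpa [hsa] using this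
  · rintro ⟨hne, hall⟩
    rcases alien_ofList_ones vs hall with h0 | h0
    · exfalso
      obtain ⟨x, xs, rfl⟩ := List.exists_cons_of_ne_nil hne
      rw [PySem.Set.ofList_cons] at h0; simp at h0
    · simp [h0]

-- the combinatorial core: A's per-word test is the permutation test
theorem alien_core (S m : List String) (hnd : S.Nodup) :
    (m.length = S.length ∧ S ≠ [] ∧ ∀ k ∈ S, (m.takeWhile (fun y => decide (y ∈ S))).count k = 1)
      ↔ (S ≠ [] ∧ m.Perm S) := by
  constructor
  · rintro ⟨hlen, hne, hcnt⟩
    refine ⟨hne, ?_⟩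
    set t := m.takeWhile (fun y => decide (y ∈ S)) with ht
    have htS : ∀ y ∈ t, y ∈ S := fun y hy => by simpa using List.mem_takeWhile_imp hy
    have hperm : t.Perm S := by
      rw [List.perm_iff_count]
      intro a
      by_cases ha : a ∈ S
      · rw [hcnt a ha, List.count_eq_one_of_mem hnd ha]
      · rw [List.count_eq_zero_of_not_mem (fun h => ha (htS a h)),
          List.count_eq_zero_of_not_mem ha]
    have hpre : t <+: m := List.takeWhile_prefix _
    have : t = m := List.IsPrefix.eq_of_length hpre (by rw [hperm.length_eq, hlen])
    rwa [← this]
  · rintro ⟨hne, hperm⟩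
    have hmem : ∀ y ∈ m, y ∈ S := fun y hy => hperm.mem_iff.mp hy
    have ht : m.takeWhile (fun y => decide (y ∈ S)) = m := by
      rw [List.takeWhile_eq_self_iff]
      intro y hy; simpa using hmem y hy
    refine ⟨hperm.length_eq, hne, ?_⟩
    intro k hk
    rw [ht, List.perm_iff_count.mp hperm k, List.count_eq_one_of_mem hnd hk]

-- loop equivalence, empty-spell case: A never returns 1
theorem alien_loop_nil (ws : List String) (d : PySem.Dict String Int) (h : d.keys = []) :
    alien_loop d ws = 2 := by
  induction ws generalizing d with
  | nil => rfl
  | cons x rest ih =>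
    rw [alien_loop]
    by_cases hg : PySem.Str.len x = (d.size : Int)
    · rw [if_pos hg]
      have hx : x.toList = [] := by
        rw [PySem.Str.len_eq, alien_size_eq_keys_length, h] at hg
        simpa using hg
      have hitems : d.items = [] := by
        have := h
        simp only [PySem.Dict.keys, List.map_eq_nil_iff] at this
        exact this
      have hcheck : alien_check (alien_inner d x.toList) = false := by
        rw [hx]
        show alien_check d = false
        have : d.values = [] := by simp [PySem.Dict.values, hitems]
        simp [alien_check, this, PySem.Set.ofList]
      rw [hcheck, if_neg (by simp)]
      apply ih
      rw [alien_mkZero_keys, alien_inner_keys, h]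
      rfl
    · rw [if_neg hg]
      exact ih d h

-- loop equivalence, main case: the dict state is invariant (keys = set(spell), all values 0)
theorem alien_loop_main (spell : List String) (hS : spell ≠ []) (ws : List String)
    (d : PySem.Dict String Int) (hk : d.keys = PySem.Set.ofList spell)
    (hv : ∀ k, d.getD k 0 = 0) :
    alien_loop d ws = alien_loopB (PySem.List.sorted (PySem.Set.ofList spell) (fun s => s)) ws := by
  induction ws generalizing d with
  | nil => rfl
  | cons x rest ih =>
    set S := PySem.Set.ofList spell with hSdef
    have hnd : S.Nodup := PySem.Set.nodup_ofList spell
    have hSne : S ≠ [] := by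
      obtain ⟨a, as, rfl⟩ := List.exists_cons_of_ne_nil hS
      rw [hSdef, PySem.Set.ofList_cons]; simp
    set m := x.toList.map (fun c => String.ofList [c]) with hm
    have hcont : ∀ y, d.contains y = decide (y ∈ S) := by
      intro y
      have := PySem.Dict.contains_iff_mem_keys d y
      rw [hk] at this
      by_cases hy : y ∈ S <;> simp [hy] at this ⊢ <;> simp [this]
    -- the takeWhile prefix of m
    have htw : ((x.toList.takeWhile (fun c => d.contains (String.ofList [c]))).map
        (fun c => String.ofList [c])) = m.takeWhile (fun y => decide (y ∈ S)) := by
      rw [hm, List.takeWhile_map]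
      have hp : (fun c => d.contains (String.ofList [c]))
          = ((fun y => decide (y ∈ S)) ∘ fun c => String.ofList [c]) := by
        funext c; exact hcont _
      rw [hp]
    -- the per-word condition chain
    have hguard : (PySem.Str.len x = (d.size : Int)) ↔ m.length = S.length := by
      rw [PySem.Str.len_eq, alien_size_eq_keys_length, hk, hm, List.length_map]
      exact_mod_cast Int.natCast_inj
    have hcheckiff : alien_check (alien_inner d x.toList) = true ↔
        (∀ k ∈ S, (m.takeWhile (fun y => decide (y ∈ S))).count k = 1) := by
      have hkeys : (alien_inner d x.toList).keys = S := by rw [alien_inner_keys, hk]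
      have hvals : (alien_inner d x.toList).values =
          S.map (fun k => ((m.takeWhile (fun y => decide (y ∈ S))).count k : Int)) := by
        rw [PySem.Dict.values_eq_map_keys _ (hkeys ▸ hnd) 0, hkeys]
        apply List.map_congr_left
        intro k _
        rw [alien_inner_getD, hv, htw]
        ring
      rw [alien_check, Bool.and_eq_true, decide_eq_true_iff, decide_eq_true_iff, hvals,
        alien_setvals]
      constructor
      · rintro ⟨-, hall⟩ k hkS
        have := hall _ (List.mem_map_of_mem hkS)
        exact_mod_cast this
      · intro hall
        refine ⟨by simpa using hSne, ?_⟩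
        intro v hv'
        obtain ⟨k, hkS, rfl⟩ := List.mem_map.mp hv'
        exact_mod_cast hall k hkS
    have hiff : ((PySem.Str.len x = (d.size : Int)) ∧ alien_check (alien_inner d x.toList) = true)
        ↔ (PySem.List.sorted m (fun s => s) = PySem.List.sorted S (fun s => s)) := by
      rw [hguard, hcheckiff, PySem.List.sorted_id_eq_sorted_id_iff_perm]
      constructor
      · rintro ⟨h1, h2⟩
        exact ((alien_core S m hnd).mp ⟨h1, hSne, h2⟩).2
      · intro hp
        have := (alien_core S m hnd).mpr ⟨hSne, hp⟩
        exact ⟨this.1, this.2.2⟩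
    rw [alien_loop, alien_loopB]
    by_cases hb : PySem.List.sorted m (fun s => s) = PySem.List.sorted S (fun s => s)
    · obtain ⟨h1, h2⟩ := hiff.mpr hb
      rw [if_pos h1, if_pos h2, if_pos hb]
    · rw [if_neg hb]
      by_cases h1 : PySem.Str.len x = (d.size : Int)
      · have h2 : alien_check (alien_inner d x.toList) = false := by
          rcases Bool.eq_false_or_eq_true (alien_check (alien_inner d x.toList)) with h | h
          · exact absurd (hiff.mp ⟨h1, h⟩) hb
          · exact h
        rw [if_pos h1, h2, if_neg (by simp)]
        apply ih
        · rw [alien_mkZero_keys, alien_inner_keys, hk]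
          exact PySem.Set.ofList_eq_self_of_nodup S hnd
        · intro k
          rw [alien_mkZero, alien_mkZero_getD]
          split <;> simp [PySem.Dict.getD_empty]
      · rw [if_neg h1]
        exact ih d hk hv

-- ===== VERDICT (by name: the statement is the Claim_ definition above) =====
theorem alien_dic_spec : Claim_equal_alien_dic := by
  intro spell dic _
  unfold Spec_alien_dic alien_dic alien_dic_alt
  by_cases h : spell = []
  · subst h
    rw [if_pos rfl]
    exact alien_loop_nil dic _ (by simp [alien_mkZero, PySem.Dict.keys_empty])
  · rw [if_neg h]
    exact alien_loop_main spell h dic _ (alien_mkZero_keys spell)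
      (fun k => by rw [alien_mkZero] ; rw [alien_mkZero_getD] ; simp [PySem.Dict.getD_empty] )
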